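-- pv_equiv track=rewrite | github.com/MatanSade1/Tools | ua-cohort-query/main.py | format_table_response
-- ===== SOURCE A (Python) =====
-- from typing import Dict, Any, Optional, Tuple, List
--
-- def format_table_response(rows: List[Dict]) -> str:
--     """Format rows as a Slack code block table."""
--     if not rows:
--         return "No results found."
--
--     # Get column names
--     columns = list(rows[0].keys())
--
--     # Calculate column widths
--     col_widths = {}
--     for col in columns:
--         col_widths[col] = max(
--             len(str(col)),
--             max(len(str(row.get(col, ''))) for row in rows)
--         )
--
--     # Build header
--     header = " | ".join(str(col).ljust(col_widths[col]) for col in columns)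
--     separator = "-+-".join("-" * col_widths[col] for col in columns)
--
--     # Build rows
--     row_lines = []
--     for row in rows:
--         row_str = " | ".join(
--             str(row.get(col, '')).ljust(col_widths[col])
--             for col in columns
--         )
--         row_lines.append(row_str)
--
--     table = f"```\n{header}\n{separator}\n" + "\n".join(row_lines) + "\n```"
--     return table
-- ===== SOURCE B (Python) =====
-- def format_table_response(rows):
--     """Format rows as a Slack code block table (built column-by-column from vertical strips)."""
--     if not rows:
--         return "No results found."
--     columns = list(rows[0].keys())
--
--     def strip(col):
--         # one column as a vertical strip of already-padded lines: header, rule, cells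
--         cells = [str(col)] + [str(row.get(col, '')) for row in rows]
--         w = max(len(c) for c in cells)
--         return [cells[0].ljust(w), '-' * w] + [c.ljust(w) for c in cells[1:]]
--
--     glue = [' | ', '-+-'] + [' | '] * len(rows)
--     lines = [''] * (len(rows) + 2)
--     for i, col in enumerate(columns):
--         s = strip(col)
--         lines = s if i == 0 else [a + g + b for a, g, b in zip(lines, glue, s)]
--     return '```\n' + '\n'.join(lines) + '\n```'
-- ===== Notes on version B (the rewrite author's own statement) =====
-- stated objective: alternative
-- what changed: Builds the table column-by-column: each column becomes a vertical strip of already-padded lines (header, rule, cells) with its width taken inside the strip, and the strips are glued horizontally by a fold that zips line lists with per-line separators, instead of A's row-major assembly that joins cells across columns for each line using a precomputed width dict.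
import Mathlib
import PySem

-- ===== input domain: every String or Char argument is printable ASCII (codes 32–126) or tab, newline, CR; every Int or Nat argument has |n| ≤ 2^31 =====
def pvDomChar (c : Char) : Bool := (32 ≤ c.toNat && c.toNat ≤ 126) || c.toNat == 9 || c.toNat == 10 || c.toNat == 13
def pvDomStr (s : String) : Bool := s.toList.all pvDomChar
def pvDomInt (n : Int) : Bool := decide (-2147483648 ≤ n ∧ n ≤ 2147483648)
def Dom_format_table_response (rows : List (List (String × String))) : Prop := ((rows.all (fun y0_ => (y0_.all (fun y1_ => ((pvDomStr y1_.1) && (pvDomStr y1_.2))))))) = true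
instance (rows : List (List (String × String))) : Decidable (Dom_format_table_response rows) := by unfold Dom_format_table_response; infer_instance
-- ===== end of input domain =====

-- B builds the table column-by-column (vertical padded strips glued horizontally by a fold
-- zipping line lists), instead of A's row-major line assembly over a precomputed width dict
-- (objective: alternative decomposition; same output).

-- shared helpers: len(s) and s.ljust(w) on the code-point list (exact: Python counts code points)
def pvLen (s : String) : Nat := s.toList.length

def pvLjust (s : String) (w : Nat) : List Char :=
  s.toList ++ List.replicate (w - s.toList.length) ' '

-- ===== PORT A =====
def format_table_response (rows : List (List (String × String))) : String :=
  match rows with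
  | [] => "No results found."
  | r0 :: _ =>
    -- columns = list(rows[0].keys())  (dict keys: first occurrences, in order)
    let columns := PySem.List.dedup (r0.map Prod.fst)
    -- col_widths dict, one insert per column; inner max over rows (nonempty, lengths ≥ 0, base 0 exact)
    let colWidths : PySem.Dict String Nat :=
      columns.foldl (fun d col =>
        d.insert col (max (pvLen col)
          ((rows.map (fun row => pvLen ((List.lookup col row).getD ""))).foldl max 0)))
        PySem.Dict.empty
    let header := PySem.Chars.join " | ".toList
      (columns.map (fun col => pvLjust col (colWidths.getD col 0)))
    let separator := PySem.Chars.join "-+-".toList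
      (columns.map (fun col => List.replicate (colWidths.getD col 0) '-'))
    let rowLines := rows.map (fun row => PySem.Chars.join " | ".toList
      (columns.map (fun col => pvLjust ((List.lookup col row).getD "") (colWidths.getD col 0))))
    String.ofList ("```\n".toList ++ header ++ "\n".toList ++ separator ++ "\n".toList
      ++ PySem.Chars.join "\n".toList rowLines ++ "\n```".toList)

-- ===== PORT B =====
-- strip(col): one column as a vertical strip of already-padded lines (header, rule, cells)
def pvStrip (rows : List (List (String × String))) (col : String) : List (List Char) :=
  let vals := rows.map (fun row => (List.lookup col row).getD "")
  let cells := col :: vals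
  -- w = max(len(c) for c in cells): cells is nonempty and lengths are ≥ 0, so foldl max 0 is exact
  let w := (cells.map pvLen).foldl max 0
  pvLjust col w :: List.replicate w '-' :: vals.map (fun c => pvLjust c w)

def format_table_response_alt (rows : List (List (String × String))) : String :=
  match rows with
  | [] => "No results found."
  | r0 :: _ =>
    let columns := PySem.List.dedup (r0.map Prod.fst)
    let glue : List (List Char) :=
      " | ".toList :: "-+-".toList :: List.replicate rows.length " | ".toList
    -- 'for i, col in enumerate(columns)': fold carrying the index i
    let lines := (columns.foldl
      (fun (st : Nat × List (List Char)) col =>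
        let s := pvStrip rows col
        (st.1 + 1, if st.1 == 0 then s
          else (st.2.zip (glue.zip s)).map (fun p => p.1 ++ p.2.1 ++ p.2.2)))
      (0, List.replicate (rows.length + 2) ([] : List Char))).2
    String.ofList ("```\n".toList ++ PySem.Chars.join "\n".toList lines ++ "\n```".toList)

-- ===== PRECONDITION & SPEC =====
def Spec_format_table_response (rows : List (List (String × String))) (out : String) : Prop := out = format_table_response_alt rows
instance (rows : List (List (String × String))) (out : String) : Decidable (Spec_format_table_response rows out) := by unfold Spec_format_table_response; infer_instance

-- ===== CLAIM =====
def Claim_equal_format_table_response : Prop := ∀ (rows : List (List (String × String))), Dom_format_table_response rows → Spec_format_table_response rows (format_table_response rows)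

-- ===== LEMMAS AND PROOFS =====

theorem pv_foldl_max_base (l : List Nat) (a : Nat) :
    l.foldl max a = max a (l.foldl max 0) := by
  induction l generalizing a with
  | nil => simp
  | cons x l ih =>
    simp only [List.foldl_cons]
    rw [ih (max a x), ih (max 0 x)]
    omega

-- looking up an untouched key through a fold of inserts
theorem pv_getD_foldl_insert_not_mem (ks : List String) (f : String → Nat)
    (d : PySem.Dict String Nat) (k : String) (hk : k ∉ ks) :
    (ks.foldl (fun d c => d.insert c (f c)) d).getD k 0 = d.getD k 0 := by
  induction ks generalizing d with
  | nil => rfl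
  | cons c cs ih =>
    simp only [List.foldl_cons]
    rw [ih _ (fun h => hk (List.mem_cons_of_mem _ h))]
    exact PySem.Dict.getD_insert_of_ne _ _ _ (fun h => hk (h ▸ List.mem_cons_self))

-- the width dict built by A answers f k on every key of a nodup key list
theorem pv_getD_foldl_insert (ks : List String) (f : String → Nat)
    (d : PySem.Dict String Nat) (k : String) (hnd : ks.Nodup) (hk : k ∈ ks) :
    (ks.foldl (fun d c => d.insert c (f c)) d).getD k 0 = f k := by
  induction ks generalizing d with
  | nil => cases hk
  | cons c cs ih =>
    simp only [List.foldl_cons]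
    rcases List.mem_cons.mp hk with rfl | hmem
    · rw [pv_getD_foldl_insert_not_mem cs f _ k ((List.nodup_cons.mp hnd).1)]
      exact PySem.Dict.getD_insert_self _ _ _ _
    · exact ih _ ((List.nodup_cons.mp hnd).2) hmem

-- join over a list extended by one element, when the prefix is nonempty
theorem pv_join_append_singleton (sep : List Char) (xs : List (List Char)) (x : List Char)
    (h : xs ≠ []) :
    PySem.Chars.join sep (xs ++ [x]) = PySem.Chars.join sep xs ++ sep ++ x := by
  induction xs with
  | nil => cases h rfl
  | cons y ys ih =>
    cases ys with
    | nil => simp [PySem.Chars.join_cons_cons, PySem.Chars.join_singleton]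
    | cons z zs =>
      have ih' := ih (by simp)
      simp only [List.cons_append] at ih' ⊢
      rw [PySem.Chars.join_cons_cons, ih', PySem.Chars.join_cons_cons]
      simp [List.append_assoc]

-- gluing the body lines: zip of two maps over the same row list with a replicated separator
theorem pv_zip_rep_map {α : Type} (R : List α) (g1 : List Char) (f g : α → List Char) :
    ((R.map f).zip ((List.replicate R.length g1).zip (R.map g))).map
      (fun p => p.1 ++ p.2.1 ++ p.2.2)
    = R.map (fun r => f r ++ g1 ++ g r) := by
  induction R with
  | nil => rfl
  | cons r R ih =>
    simp only [List.map_cons, List.length_cons, List.replicate_succ, List.zip_cons_cons]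
    rw [ih]

-- the line list A's string is assembled from, as a function of the column list
def pvALines (R : List (List (String × String))) (W : String → Nat) (cs : List String) : List (List Char) :=
  PySem.Chars.join " | ".toList (cs.map (fun c => pvLjust c (W c))) ::
  PySem.Chars.join "-+-".toList (cs.map (fun c => List.replicate (W c) '-')) ::
  R.map (fun row => PySem.Chars.join " | ".toList (cs.map (fun c => pvLjust ((List.lookup c row).getD "") (W c))))

-- a strip computes the padded column for A's width W
theorem pv_strip_eq (R : List (List (String × String))) (c : String) :
    pvStrip R c = pvLjust c (max (pvLen c) ((R.map (fun row => pvLen ((List.lookup c row).getD ""))).foldl max 0)) ::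
      List.replicate (max (pvLen c) ((R.map (fun row => pvLen ((List.lookup c row).getD ""))).foldl max 0)) '-' ::
      R.map (fun row => pvLjust ((List.lookup c row).getD "")
        (max (pvLen c) ((R.map (fun row => pvLen ((List.lookup c row).getD ""))).foldl max 0))) := by
  unfold pvStrip
  simp only [List.map_cons, List.foldl_cons, List.map_map, Function.comp_def]
  rw [pv_foldl_max_base]
  simp

-- gluing one more strip onto the already-assembled lines appends the column to every line
theorem pv_glue_step (R : List (List (String × String))) (W : String → Nat) (c : String)
    (pre : List String) (hpre : pre ≠ []) :
    ((pvALines R W pre).zip ((" | ".toList :: "-+-".toList :: List.replicate R.length " | ".toList).zip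
        (pvLjust c (W c) :: List.replicate (W c) '-' ::
          R.map (fun row => pvLjust ((List.lookup c row).getD "") (W c))))).map
      (fun p => p.1 ++ p.2.1 ++ p.2.2)
    = pvALines R W (pre ++ [c]) := by
  unfold pvALines
  simp only [List.zip_cons_cons, List.map_cons, List.map_append, List.map_nil]
  rw [pv_zip_rep_map]
  rw [pv_join_append_singleton _ _ _ (by simpa using hpre),
    pv_join_append_singleton _ _ _ (by simpa using hpre)]
  refine congrArg₂ _ rfl (congrArg₂ _ rfl ?_)
  apply List.map_congr_left
  intro row _
  rw [pv_join_append_singleton _ _ _ (by simpa using hpre)]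

-- the indexed fold over the remaining columns extends the assembled lines column by column
theorem pv_fold_glue (R : List (List (String × String))) (W : String → Nat)
    (hstrip : ∀ c, pvStrip R c = pvLjust c (W c) :: List.replicate (W c) '-' ::
      R.map (fun row => pvLjust ((List.lookup c row).getD "") (W c)))
    (cs : List String) : ∀ (k : Nat) (pre : List String), k ≠ 0 → pre ≠ [] →
    (cs.foldl (fun (st : Nat × List (List Char)) col =>
        let s := pvStrip R col
        (st.1 + 1, if st.1 == 0 then s
          else (st.2.zip ((" | ".toList :: "-+-".toList :: List.replicate R.length " | ".toList).zip s)).map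
            (fun p => p.1 ++ p.2.1 ++ p.2.2)))
      (k, pvALines R W pre)).2 = pvALines R W (pre ++ cs) := by
  induction cs with
  | nil => intro k pre _ _; simp
  | cons c cs ih =>
    intro k pre hk hpre
    simp only [List.foldl_cons]
    have hk' : (k == 0) = false := by simp [hk]
    simp only [hk', if_false, Bool.false_eq_true, hstrip c]
    rw [pv_glue_step R W c pre hpre]
    have hsplit : pre ++ c :: cs = (pre ++ [c]) ++ cs := by simp
    rw [hsplit]
    exact ih (k + 1) (pre ++ [c]) (by omega) (by simp)

-- ===== VERDICT =====
theorem format_table_response_spec : Claim_equal_format_table_response := by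
  intro rows _
  unfold Spec_format_table_response format_table_response format_table_response_alt
  cases rows with
  | nil => rfl
  | cons r0 rest =>
    simp only
    have hnd : (PySem.List.dedup (r0.map Prod.fst)).Nodup := PySem.List.nodup_dedup _
    generalize hcols : PySem.List.dedup (r0.map Prod.fst) = columns at hnd
    set R : List (List (String × String)) := r0 :: rest with hR
    set W : String → Nat := fun c =>
      max (pvLen c) ((R.map (fun row => pvLen ((List.lookup c row).getD ""))).foldl max 0)
      with hW
    have hdict : ∀ c ∈ columns,
        ((columns.foldl (fun d col => d.insert col (W col)) PySem.Dict.empty).getD c 0) = W c :=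
      fun c hc => pv_getD_foldl_insert columns W _ c hnd hc
    have hstrip : ∀ c, pvStrip R c = pvLjust c (W c) :: List.replicate (W c) '-' ::
        R.map (fun row => pvLjust ((List.lookup c row).getD "") (W c)) :=
      fun c => pv_strip_eq R c
    have h1 : columns.map (fun col => pvLjust col
          ((columns.foldl (fun d col => d.insert col (W col)) PySem.Dict.empty).getD col 0))
        = columns.map (fun col => pvLjust col (W col)) :=
      List.map_congr_left fun c hc => by rw [hdict c hc]
    have h2 : columns.map (fun col =>
          List.replicate ((columns.foldl (fun d col => d.insert col (W col)) PySem.Dict.empty).getD col 0) '-')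
        = columns.map (fun col => List.replicate (W col) '-') :=
      List.map_congr_left fun c hc => by rw [hdict c hc]
    have h3 : R.map (fun row => PySem.Chars.join " | ".toList
          (columns.map (fun col => pvLjust ((List.lookup col row).getD "")
            ((columns.foldl (fun d col => d.insert col (W col)) PySem.Dict.empty).getD col 0))))
        = R.map (fun row => PySem.Chars.join " | ".toList
            (columns.map (fun col => pvLjust ((List.lookup col row).getD "") (W col)))) :=
      List.map_congr_left fun row _ => congrArg (PySem.Chars.join " | ".toList)
        (List.map_congr_left fun c hc => by simp only [hdict c hc])
    rw [h1, h2, h3]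
    -- B side: the indexed fold assembles pvALines R W columns (or all-empty lines if no columns)
    cases columns with
    | nil =>
      simp [PySem.Chars.join_nil, List.replicate_succ, PySem.Chars.join_cons_cons, hR]
    | cons c cs =>
      have hfirst : pvStrip R c = pvALines R W [c] := by
        rw [hstrip c]
        simp [pvALines, PySem.Chars.join_singleton]
      have hB : ((c :: cs).foldl (fun (st : Nat × List (List Char)) col =>
            let s := pvStrip R col
            (st.1 + 1, if st.1 == 0 then s
              else (st.2.zip ((" | ".toList :: "-+-".toList :: List.replicate R.length " | ".toList).zip s)).map
                (fun p => p.1 ++ p.2.1 ++ p.2.2)))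
          (0, List.replicate (R.length + 2) ([] : List Char))).2 = pvALines R W (c :: cs) := by
        simp only [List.foldl_cons]
        rw [hfirst]
        exact pv_fold_glue R W hstrip cs 1 [c] (by omega) (by simp)
      rw [hB]
      have hrls : R.map (fun row => PySem.Chars.join " | ".toList
            ((c :: cs).map (fun col => pvLjust ((List.lookup col row).getD "") (W col))))
          = (fun row => PySem.Chars.join " | ".toList
            ((c :: cs).map (fun col => pvLjust ((List.lookup col row).getD "") (W col)))) r0 ::
            rest.map (fun row => PySem.Chars.join " | ".toList
            ((c :: cs).map (fun col => pvLjust ((List.lookup col row).getD "") (W col)))) := by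
        rw [hR]; rfl
      unfold pvALines
      rw [hrls, PySem.Chars.join_cons_cons, PySem.Chars.join_cons_cons]
      simp [List.append_assoc]
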